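-- pv_equiv track=rewrite | github.com/Muzer/grabblebot | grabble.py | is_subanagram
-- ===== SOURCE A (Python) =====
-- def is_subanagram(word1, word2):
--     sorted_old_word_dup = sorted(word2)
--     sorted_word_dup = sorted(word1)
--     for i in sorted_old_word_dup:
--         if not i in sorted_word_dup:
--             if not "@" in sorted_word_dup:
--                 return (False, [])
--             else:
--                 sorted_word_dup.remove("@")
--         else:
--             sorted_word_dup.remove(i)
--     return (True, sorted_word_dup)
-- ===== SOURCE B (Python) =====
-- def is_subanagram(word1, word2):
--     have = {}
--     for c in word1:
--         have[c] = have.get(c, 0) + 1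
--     need = {}
--     for c in word2:
--         need[c] = need.get(c, 0) + 1
--     wild = 0
--     for c, n in need.items():
--         if c != "@":
--             wild += max(0, n - have.get(c, 0))
--     spare = have.get("@", 0) - need.get("@", 0) - wild
--     if spare < 0:
--         return (False, [])
--     left = []
--     for c, n in have.items():
--         left.extend([c] * max(0, spare if c == "@" else n - need.get(c, 0)))
--     return (True, sorted(left))
-- ===== Notes on version B (the rewrite author's own statement) =====
-- stated objective: faster
-- what changed: Replaces A's greedy loop over the sorted letters of word2 (which consumes letters of a sorted copy of word1 one by one, falling back to '@' wildcards) with two count dictionaries and multiset arithmetic: wildcards needed = sum over word2's letters of their deficit, spare '@'s = have['@'] - need['@'] - wildcards, leftover built from per-letter surpluses and sorted once.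
import Mathlib
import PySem

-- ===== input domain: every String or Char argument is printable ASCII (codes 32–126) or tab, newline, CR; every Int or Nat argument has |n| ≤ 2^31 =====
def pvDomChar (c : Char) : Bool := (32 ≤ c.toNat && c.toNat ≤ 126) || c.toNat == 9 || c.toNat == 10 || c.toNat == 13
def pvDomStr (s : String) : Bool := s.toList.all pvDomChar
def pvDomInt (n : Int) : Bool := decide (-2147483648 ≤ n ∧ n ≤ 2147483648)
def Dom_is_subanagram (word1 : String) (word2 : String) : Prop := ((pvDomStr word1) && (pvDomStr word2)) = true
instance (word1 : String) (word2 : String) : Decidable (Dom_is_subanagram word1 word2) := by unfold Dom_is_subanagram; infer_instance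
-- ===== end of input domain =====

-- B replaces A's greedy per-letter consumption loop (list membership + remove per letter)
-- by two count dictionaries and multiset arithmetic (wildcards needed / spare letters);
-- objective: faster (no per-letter scan of the remaining-letters list).
-- Characters of the Python word lists are modelled as Char; the single-character
-- Python strings are rebuilt with String.mk at the return (singleton-string order = Char order).

-- ===== PORT A =====
-- the for-loop of A with early return; remove on a present element is List.erase
-- (PySem.List.remove?_eq_some_erase); the membership guards mirror A's 'in' tests
def isSubLoop : List Char → List Char → Bool × List Char
  | [], dup => (true, dup)
  | i :: rest, dup =>
    if i ∉ dup then
      (if '@' ∉ dup then (false, [])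
       else isSubLoop rest (dup.erase '@'))
    else isSubLoop rest (dup.erase i)

def is_subanagram (word1 : String) (word2 : String) : Bool × List String :=
  let sortedOldWordDup := PySem.List.sorted word2.toList (fun c => c) false
  let sortedWordDup := PySem.List.sorted word1.toList (fun c => c) false
  let r := isSubLoop sortedOldWordDup sortedWordDup
  (r.1, r.2.map (fun c => String.ofList [c]))

-- ===== PORT B =====
def is_subanagram_alt (word1 : String) (word2 : String) : Bool × List String :=
  -- have[c] = have.get(c, 0) + 1  is  Dict.modify c 0 (· + 1)
  let haveD := word1.toList.foldl (fun d c => d.modify c 0 (· + 1)) PySem.Dict.empty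
  let needD := word2.toList.foldl (fun d c => d.modify c 0 (· + 1)) PySem.Dict.empty
  let wild := needD.items.foldl
    (fun w p => if p.1 ≠ '@' then w + max 0 (p.2 - haveD.getD p.1 0) else w) (0 : Int)
  let spare := haveD.getD '@' 0 - needD.getD '@' 0 - wild
  if spare < 0 then (false, [])
  else
    let left := haveD.items.foldl
      (fun acc p =>
        acc ++ List.replicate (max 0 (if p.1 = '@' then spare else p.2 - needD.getD p.1 0)).toNat p.1)
      ([] : List Char)
    (true, (PySem.List.sorted left (fun c => c) false).map (fun c => String.ofList [c]))

-- ===== PRECONDITION & SPEC =====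
def Spec_is_subanagram (word1 : String) (word2 : String) (out : Bool × List String) : Prop := out = is_subanagram_alt word1 word2
instance (word1 : String) (word2 : String) (out : Bool × List String) : Decidable (Spec_is_subanagram word1 word2 out) := by unfold Spec_is_subanagram; infer_instance

-- ===== CLAIM (what is proved, stated in full; the proofs are below) =====
def Claim_equal_is_subanagram : Prop := ∀ (word1 : String) (word2 : String), Dom_is_subanagram word1 word2 → Spec_is_subanagram word1 word2 (is_subanagram word1 word2)

-- ===== LEMMAS AND PROOFS =====

-- wildcards the greedy loop will spend on letters of l not covered by d
def pvW (l d : List Char) : Int :=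
  ∑ c ∈ l.toFinset.erase '@', max 0 ((l.count c : Int) - d.count c)

-- '@'s of d left over after the whole loop (negative = the loop fails)
def pvC (l d : List Char) : Int := (d.count '@' : Int) - l.count '@' - pvW l d

-- B's spare-'@' count, in terms of raw letter counts
def pvSpare (w1l w2l : List Char) : Int :=
  (w1l.count '@' : Int) - w2l.count '@' - pvW w2l w1l

theorem pvW_nonneg (l d : List Char) : 0 ≤ pvW l d :=
  Finset.sum_nonneg (fun _ _ => le_max_left 0 _)

theorem pvW_cons_mem (i : Char) (l d : List Char) (h : i ∈ d) :
    pvW (i :: l) d = pvW l (d.erase i) := by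
  have hd1 : 1 ≤ d.count i := List.one_le_count_iff.mpr h
  unfold pvW
  by_cases hi : i = '@'
  · subst hi
    rw [List.toFinset_cons, Finset.erase_insert_eq_erase]
    refine Finset.sum_congr rfl (fun c hc => ?_)
    have hc' : c ≠ '@' := (Finset.mem_erase.mp hc).1
    rw [List.count_cons_of_ne (Ne.symm hc'), List.count_erase_of_ne hc']
  · by_cases hmem : i ∈ l.toFinset
    · have hS : (i :: l).toFinset.erase '@' = l.toFinset.erase '@' := by
        rw [List.toFinset_cons, Finset.insert_eq_self.mpr hmem]
      have hiS : i ∈ l.toFinset.erase '@' := Finset.mem_erase.mpr ⟨hi, hmem⟩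
      rw [hS, ← Finset.add_sum_erase _ (fun c => max 0 (((i :: l).count c : Int) - d.count c)) hiS,
        ← Finset.add_sum_erase _ (fun c => max 0 ((l.count c : Int) - (d.erase i).count c)) hiS]
      congr 1
      · congr 1
        rw [List.count_cons_self]
        have he : (d.erase i).count i = d.count i - 1 := List.count_erase_self
        rw [he]
        push_cast [Nat.cast_sub hd1]
        ring
      · refine Finset.sum_congr rfl (fun c hc => ?_)
        have h1 : c ≠ i := (Finset.mem_erase.mp hc).1
        rw [List.count_cons_of_ne (Ne.symm h1), List.count_erase_of_ne h1]
    · have hnl : i ∉ l := fun hmm => hmem (List.mem_toFinset.mpr hmm)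
      have hS : (i :: l).toFinset.erase '@' = insert i (l.toFinset.erase '@') := by
        rw [List.toFinset_cons, Finset.erase_insert_of_ne hi]
      have hiS : i ∉ l.toFinset.erase '@' := fun hmm => hmem (Finset.mem_of_mem_erase hmm)
      rw [hS, Finset.sum_insert hiS]
      have hterm : max 0 (((i :: l).count i : Int) - d.count i) = 0 := by
        rw [List.count_cons_self, List.count_eq_zero.mpr hnl]
        omega
      rw [hterm, zero_add]
      refine Finset.sum_congr rfl (fun c hc => ?_)
      have h1 : c ≠ i := fun e => hiS (e ▸ hc)
      rw [List.count_cons_of_ne (Ne.symm h1), List.count_erase_of_ne h1]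

theorem pvW_cons_not_mem (i : Char) (l d : List Char) (h : i ∉ d) (hne : i ≠ '@') :
    pvW (i :: l) d = 1 + pvW l (d.erase '@') := by
  have hd0 : d.count i = 0 := List.count_eq_zero.mpr h
  unfold pvW
  by_cases hmem : i ∈ l.toFinset
  · have hS : (i :: l).toFinset.erase '@' = l.toFinset.erase '@' := by
      rw [List.toFinset_cons, Finset.insert_eq_self.mpr hmem]
    have hiS : i ∈ l.toFinset.erase '@' := Finset.mem_erase.mpr ⟨hne, hmem⟩
    rw [hS, ← Finset.add_sum_erase _ (fun c => max 0 (((i :: l).count c : Int) - d.count c)) hiS,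
      ← Finset.add_sum_erase _ (fun c => max 0 ((l.count c : Int) - (d.erase '@').count c)) hiS]
    have h1 : max 0 (((i :: l).count i : Int) - d.count i)
        = 1 + max 0 ((l.count i : Int) - (d.erase '@').count i) := by
      rw [List.count_cons_self, hd0, List.count_erase_of_ne hne, hd0]
      omega
    rw [h1, add_assoc]
    congr 1
    congr 1
    refine Finset.sum_congr rfl (fun c hc => ?_)
    have hci : c ≠ i := (Finset.mem_erase.mp hc).1
    have hca : c ≠ '@' := (Finset.mem_erase.mp (Finset.mem_of_mem_erase hc)).1
    rw [List.count_cons_of_ne (Ne.symm hci), List.count_erase_of_ne hca]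
  · have hnl : i ∉ l := fun hmm => hmem (List.mem_toFinset.mpr hmm)
    have hS : (i :: l).toFinset.erase '@' = insert i (l.toFinset.erase '@') := by
      rw [List.toFinset_cons, Finset.erase_insert_of_ne hne]
    have hiS : i ∉ l.toFinset.erase '@' := fun hmm => hmem (Finset.mem_of_mem_erase hmm)
    rw [hS, Finset.sum_insert hiS]
    have hterm : max 0 (((i :: l).count i : Int) - d.count i) = 1 := by
      rw [List.count_cons_self, hd0, List.count_eq_zero.mpr hnl]
      omega
    rw [hterm]
    congr 1
    refine Finset.sum_congr rfl (fun c hc => ?_)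
    have hci : c ≠ i := fun e => hiS (e ▸ hc)
    have hca : c ≠ '@' := (Finset.mem_erase.mp hc).1
    rw [List.count_cons_of_ne (Ne.symm hci), List.count_erase_of_ne hca]

theorem pvC_cons_mem (i : Char) (l d : List Char) (h : i ∈ d) :
    pvC (i :: l) d = pvC l (d.erase i) := by
  unfold pvC
  rw [pvW_cons_mem i l d h]
  by_cases hi : i = '@'
  · subst hi
    have hd1 : 1 ≤ d.count '@' := List.one_le_count_iff.mpr h
    rw [List.count_cons_self, List.count_erase_self]
    push_cast [Nat.cast_sub hd1]
    ring
  · rw [List.count_cons_of_ne hi, List.count_erase_of_ne (Ne.symm hi)]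

theorem pvC_cons_wild (i : Char) (l d : List Char) (h : i ∉ d) (h2 : '@' ∈ d) :
    pvC (i :: l) d = pvC l (d.erase '@') := by
  have hne : i ≠ '@' := fun e => h (e ▸ h2)
  have hd1 : 1 ≤ d.count '@' := List.one_le_count_iff.mpr h2
  unfold pvC
  rw [pvW_cons_not_mem i l d h hne, List.count_cons_of_ne hne,
    List.count_erase_self]
  push_cast [Nat.cast_sub hd1]
  ring

theorem pvC_cons_fail (i : Char) (l d : List Char) (h : i ∉ d) (h2 : '@' ∉ d) :
    pvC (i :: l) d < 0 := by
  have hd0 : d.count '@' = 0 := List.count_eq_zero.mpr h2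
  unfold pvC
  by_cases hi : i = '@'
  · subst hi
    have := pvW_nonneg ('@' :: l) d
    rw [List.count_cons_self, hd0]
    omega
  · rw [pvW_cons_not_mem i l d h hi, hd0]
    have := pvW_nonneg l (d.erase '@')
    omega

theorem loop_false (l : List Char) : ∀ d, pvC l d < 0 → isSubLoop l d = (false, []) := by
  induction l with
  | nil =>
    intro d h
    simp [pvC, pvW] at h
    omega
  | cons i rest ih =>
    intro d h
    simp only [isSubLoop]
    by_cases h1 : i ∈ d
    · rw [if_neg (not_not_intro h1)]
      exact ih _ (by rw [← pvC_cons_mem i rest d h1]; exact h)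
    · rw [if_pos h1]
      by_cases h2 : '@' ∈ d
      · rw [if_neg (not_not_intro h2)]
        exact ih _ (by rw [← pvC_cons_wild i rest d h1 h2]; exact h)
      · rw [if_pos h2]

theorem loop_true (l : List Char) : ∀ d, 0 ≤ pvC l d →
    (isSubLoop l d).1 = true ∧
    ∀ c, ((isSubLoop l d).2.count c : Int) =
      (if c = '@' then pvC l d else max 0 ((d.count c : Int) - l.count c)) := by
  induction l with
  | nil =>
    intro d _
    refine ⟨rfl, fun c => ?_⟩
    simp only [isSubLoop]
    by_cases hc : c = '@'
    · subst hc
      simp [pvC, pvW]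
    · simp [hc]
  | cons i rest ih =>
    intro d h
    simp only [isSubLoop]
    by_cases h1 : i ∈ d
    · rw [if_neg (not_not_intro h1)]
      have hstep := pvC_cons_mem i rest d h1
      obtain ⟨hb, hcnt⟩ := ih (d.erase i) (by rw [← hstep]; exact h)
      refine ⟨hb, fun c => ?_⟩
      rw [hcnt c]
      by_cases hc : c = '@'
      · simp only [hc, if_true]
        exact hstep.symm
      · simp only [if_neg hc]
        by_cases hci : c = i
        · subst hci
          have hd1 : 1 ≤ d.count c := List.one_le_count_iff.mpr h1
          rw [List.count_erase_self, List.count_cons_self]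
          push_cast [Nat.cast_sub hd1]
          omega
        · rw [List.count_erase_of_ne hci, List.count_cons_of_ne (fun e => hci e.symm)]
    · rw [if_pos h1]
      by_cases h2 : '@' ∈ d
      swap
      · exact absurd h (by simpa using pvC_cons_fail i rest d h1 h2)
      rw [if_neg (not_not_intro h2)]
      have hstep := pvC_cons_wild i rest d h1 h2
      obtain ⟨hb, hcnt⟩ := ih (d.erase '@') (by rw [← hstep]; exact h)
      refine ⟨hb, fun c => ?_⟩
      rw [hcnt c]
      by_cases hc : c = '@'
      · simp only [hc, if_true]
        exact hstep.symm
      · simp only [if_neg hc]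
        rw [List.count_erase_of_ne hc]
        by_cases hci : c = i
        · subst hci
          have : d.count c = 0 := List.count_eq_zero.mpr h1
          rw [this, List.count_cons_self]
          omega
        · rw [List.count_cons_of_ne (fun e => hci e.symm)]

theorem loop_pairwise (l : List Char) : ∀ d, d.Pairwise (· ≤ ·) →
    (isSubLoop l d).2.Pairwise (· ≤ ·) := by
  induction l with
  | nil => intro d h; exact h
  | cons i rest ih =>
    intro d h
    simp only [isSubLoop]
    by_cases h1 : i ∈ d
    · rw [if_neg (not_not_intro h1)]
      exact ih _ (h.sublist List.erase_sublist)
    · rw [if_pos h1]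
      by_cases h2 : '@' ∈ d
      · rw [if_neg (not_not_intro h2)]
        exact ih _ (h.sublist List.erase_sublist)
      · rw [if_pos h2]
        exact List.Pairwise.nil

theorem pvW_perm {l l' d d' : List Char} (hl : l.Perm l') (hd : d.Perm d') :
    pvW l d = pvW l' d' := by
  unfold pvW
  rw [List.toFinset_eq_of_perm _ _ hl]
  exact Finset.sum_congr rfl (fun c _ => by rw [hl.count_eq, hd.count_eq])

theorem toFinset_ofList (xs : List Char) : (PySem.Set.ofList xs).toFinset = xs.toFinset := by
  ext c
  simp [List.mem_toFinset, PySem.Set.mem_ofList]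

-- the wild accumulation loop over a duplicate-free key list is a Finset sum
theorem foldl_skip_at (s : List Char) (f : Char → Int) :
    ∀ a : Int, s.Nodup →
      s.foldl (fun w k => if k ≠ '@' then w + f k else w) a
        = a + ∑ c ∈ s.toFinset.erase '@', f c := by
  induction s with
  | nil => intro a _; simp
  | cons x t ih =>
    intro a hs
    obtain ⟨hx, ht⟩ := List.nodup_cons.mp hs
    simp only [List.foldl_cons]
    by_cases hxa : x = '@'
    · subst hxa
      rw [if_neg (by simp), ih a ht, List.toFinset_cons, Finset.erase_insert_eq_erase]
    · rw [if_pos hxa, ih (a + f x) ht, List.toFinset_cons, Finset.erase_insert_of_ne hxa,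
        Finset.sum_insert (fun hmm => hx (List.mem_toFinset.mp (Finset.mem_of_mem_erase hmm)))]
      ring

-- counting one char in a flatMap of replicates over a duplicate-free key list
theorem count_flatMap_repl (s : List Char) (m : Char → Nat) (x : Char) :
    s.Nodup →
      (s.flatMap (fun k => List.replicate (m k) k)).count x
        = if x ∈ s then m x else 0 := by
  induction s with
  | nil => intro _; simp
  | cons k t ih =>
    intro hs
    obtain ⟨hk, ht⟩ := List.nodup_cons.mp hs
    rw [List.flatMap_cons, List.count_append, ih ht]
    by_cases hxk : x = k
    · subst hxk
      rw [if_neg hk, List.count_replicate_self, if_pos List.mem_cons_self, add_zero]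
    · have h0 : (List.replicate (m k) k).count x = 0 :=
        List.count_eq_zero.mpr (by simp [List.mem_replicate, hxk])
      rw [h0, zero_add]
      by_cases hxt : x ∈ t
      · rw [if_pos hxt, if_pos (List.mem_cons_of_mem _ hxt)]
      · rw [if_neg hxt, if_neg (by simp [hxk, hxt])]

-- B's wild fold computes pvW on the raw letter lists
theorem wild_eq (w1l w2l : List Char) :
    (PySem.Dict.counter w2l).items.foldl
        (fun w p => if p.1 ≠ '@' then w + max 0 (p.2 - (PySem.Dict.counter w1l).getD p.1 0) else w)
        (0 : Int)
      = pvW w2l w1l := by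
  rw [PySem.Dict.items_counter, List.foldl_map]
  simp only [PySem.Dict.getD_counter]
  rw [foldl_skip_at _ _ 0 (PySem.Set.nodup_ofList w2l), toFinset_ofList, zero_add]
  rfl

-- B's leftover fold, counted per character
theorem left_count (w1l w2l : List Char) (spare : Int) (x : Char) :
    ((PySem.Dict.counter w1l).items.foldl
        (fun acc p =>
          acc ++ List.replicate (max 0 (if p.1 = '@' then spare
            else p.2 - (w2l.count p.1 : Int))).toNat p.1)
        ([] : List Char)).count x
      = if x ∈ w1l then
          (max 0 (if x = '@' then spare else (w1l.count x : Int) - w2l.count x)).toNat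
        else 0 := by
  rw [PySem.List.foldl_append_eq_flatMap, List.nil_append, PySem.Dict.items_counter,
    List.flatMap_map]
  have hcc := count_flatMap_repl (PySem.Set.ofList w1l)
      (fun k => (max 0 (if k = '@' then spare else (w1l.count k : Int) - w2l.count k)).toNat) x
      (PySem.Set.nodup_ofList w1l)
  rw [hcc]
  by_cases hx : x ∈ w1l
  · rw [if_pos ((PySem.Set.mem_ofList w1l x).mpr hx), if_pos hx]
  · rw [if_neg (fun hmm => hx ((PySem.Set.mem_ofList w1l x).mp hmm)), if_neg hx]

-- ===== VERDICT (by name: the statement is the Claim_ definition above) =====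
theorem is_subanagram_spec : Claim_equal_is_subanagram := by
  intro word1 word2 _
  unfold Spec_is_subanagram
  simp only [is_subanagram, is_subanagram_alt]
  rw [← PySem.Dict.counter_eq_foldl word1.toList, ← PySem.Dict.counter_eq_foldl word2.toList,
    wild_eq word1.toList word2.toList]
  simp only [PySem.Dict.getD_counter]
  set w1l := word1.toList
  set w2l := word2.toList
  set so2 := PySem.List.sorted w2l (fun c => c) false with hso2
  set sd := PySem.List.sorted w1l (fun c => c) false with hsd
  have hCeq : pvSpare w1l w2l = pvC so2 sd := by
    unfold pvSpare pvC
    rw [pvW_perm (PySem.List.sorted_perm w2l (fun c => c) false).symm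
          (PySem.List.sorted_perm w1l (fun c => c) false).symm,
      (PySem.List.sorted_perm w2l (fun c => c) false).count_eq,
      (PySem.List.sorted_perm w1l (fun c => c) false).count_eq]
  by_cases hlt : (w1l.count '@' : Int) - w2l.count '@' - pvW w2l w1l < 0
  · rw [if_pos hlt]
    have hC : pvC so2 sd < 0 := by rw [← hCeq]; exact hlt
    rw [loop_false so2 sd hC]
    rfl
  · rw [if_neg hlt]
    have hC : 0 ≤ pvC so2 sd := by rw [← hCeq]; unfold pvSpare; omega
    obtain ⟨hb, hcnt⟩ := loop_true so2 sd hC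
    have hsortA : (isSubLoop so2 sd).2.Pairwise (· ≤ ·) :=
      loop_pairwise so2 sd (by simpa using PySem.List.sorted_pairwise w1l (fun c => c))
    refine Prod.ext ?_ ?_
    · simpa using hb
    · show (isSubLoop so2 sd).2.map (fun c => String.ofList [c]) = _
      congr 1
      refine List.Perm.eq_of_pairwise (fun a b _ _ hab hba => le_antisymm hab hba)
        hsortA (by simpa using PySem.List.sorted_pairwise _ (fun c : Char => c)) ?_
      rw [List.perm_iff_count]
      intro c
      have hperm := PySem.List.sorted_perm
        ((PySem.Dict.counter w1l).items.foldl
          (fun acc p =>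
            acc ++ List.replicate (max 0 (if p.1 = '@' then
              (w1l.count '@' : Int) - w2l.count '@' - pvW w2l w1l
              else p.2 - (w2l.count p.1 : Int))).toNat p.1)
          ([] : List Char)) (fun c : Char => c) false
      rw [hperm.count_eq, left_count w1l w2l _ c]
      have hA := hcnt c
      have hc1 : (sd.count c : Int) = w1l.count c :=
        congrArg Nat.cast ((PySem.List.sorted_perm w1l (fun c => c) false).count_eq c)
      have hc2 : (so2.count c : Int) = w2l.count c :=
        congrArg Nat.cast ((PySem.List.sorted_perm w2l (fun c => c) false).count_eq c)
      by_cases hca : c = '@'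
      · subst hca
        rw [if_pos rfl] at hA
        rw [← hCeq] at hA
        unfold pvSpare at hA
        by_cases hmem : '@' ∈ w1l
        · rw [if_pos hmem, if_pos rfl]
          omega
        · rw [if_neg hmem]
          have h0 : w1l.count '@' = 0 := List.count_eq_zero.mpr hmem
          have hnn := pvW_nonneg w2l w1l
          omega
      · rw [if_neg hca, hc1, hc2] at hA
        by_cases hmem : c ∈ w1l
        · rw [if_pos hmem, if_neg hca]
          omega
        · rw [if_neg hmem]
          have h0 : w1l.count c = 0 := List.count_eq_zero.mpr hmem
          omega
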